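-- pv_equiv track=rewrite | github.com/HlodM/yandex_algo_interviews_36783 | P.Tree_Border/code.py | get_tree_border
-- ===== SOURCE A (Python) =====
-- from typing import List
--
-- def get_tree_border(nodes: List, root_id: int) -> List[int]:
--
--     border = [root_id]
--     to_visit = [node for node in nodes[root_id] if node != -1]
--
--     while to_visit:
--         childs = []
--         for idx, node in enumerate(to_visit):
--             if idx in (0, len(to_visit)-1) or sum(nodes[node]) == -2:
--                 border.append(node)
--             childs.extend(child for child in nodes[node] if child != -1)
--         to_visit = childs
--
--     return border
-- ===== SOURCE B (Python) =====
-- def get_tree_border(nodes, root_id):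
--     # Preorder DFS recursion grouping nodes by depth (left-to-right order within
--     # each depth equals BFS level order), then per-depth border selection.
--     table = []
--
--     def dfs(node, depth):
--         if depth == len(table):
--             table.append([])
--         table[depth].append(node)
--         for child in nodes[node]:
--             if child != -1:
--                 dfs(child, depth + 1)
--
--     dfs(root_id, 0)
--     border = [root_id]
--     for lev in table[1:]:
--         last = len(lev) - 1
--         border += [n for i, n in enumerate(lev)
--                    if i == 0 or i == last or sum(nodes[n]) == -2]
--     return border
-- ===== Notes on version B (the rewrite author's own statement) =====
-- stated objective: alternative
-- what changed: A does an iterative level-order BFS with an explicit to_visit queue, fusing border selection with child expansion; B instead traverses the tree by recursive preorder DFS that groups nodes into a depth-indexed table (left-to-right DFS order per depth provably equals BFS level order), then selects the border from each depth list in a second pass.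
import Mathlib
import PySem

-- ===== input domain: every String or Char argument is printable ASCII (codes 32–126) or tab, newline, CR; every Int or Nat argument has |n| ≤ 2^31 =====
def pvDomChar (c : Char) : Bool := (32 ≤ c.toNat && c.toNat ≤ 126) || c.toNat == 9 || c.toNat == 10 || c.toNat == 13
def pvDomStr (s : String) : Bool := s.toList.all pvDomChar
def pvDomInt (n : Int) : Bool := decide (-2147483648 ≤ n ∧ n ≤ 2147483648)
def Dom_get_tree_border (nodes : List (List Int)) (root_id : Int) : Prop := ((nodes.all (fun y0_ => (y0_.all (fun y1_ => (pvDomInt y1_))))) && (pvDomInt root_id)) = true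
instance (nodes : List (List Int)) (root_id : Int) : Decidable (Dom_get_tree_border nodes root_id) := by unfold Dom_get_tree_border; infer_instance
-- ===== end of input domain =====

-- B replaces A's iterative level-order BFS by a recursive preorder DFS that
-- groups nodes into a depth table, then selects the border per depth; same
-- return value, no speed claim.

-- ===== PORT A =====
-- '[c for c in nodes[i] if c != -1]' (used twice in A); pyGet?.getD [] is a totality
-- guard: Pre_ guarantees every looked-up index is in range, where pyGet? = some.
def pvChildren (nodes : List (List Int)) (node : Int) : List Int :=
  ((PySem.List.pyGet? nodes node).getD []).filter (fun c => c ≠ -1)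

-- 'sum(nodes[node])' (same totality guard)
def pvRowSum (nodes : List (List Int)) (node : Int) : Int :=
  ((PySem.List.pyGet? nodes node).getD []).sum

-- A's 'while to_visit' loop; fuel is a totality guard only (under Pre_ the level
-- count is bounded by the node count, so nodes.length + 1 levels are never reached).
def pvALoop (nodes : List (List Int)) : Nat → List Int → List Int → List Int
  | 0, border, _ => border
  | fuel+1, border, to_visit =>
    if to_visit.isEmpty then border
    else
      let st := (PySem.List.enumerate to_visit 0).foldl
        (fun (s : List Int × List Int) p =>
          ((if p.1 = 0 ∨ p.1 = (to_visit.length : Int) - 1 ∨ pvRowSum nodes p.2 = -2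
            then s.1 ++ [p.2] else s.1),
           s.2 ++ pvChildren nodes p.2))
        (border, [])
      pvALoop nodes fuel st.1 st.2

def get_tree_border (nodes : List (List Int)) (root_id : Int) : List Int :=
  pvALoop nodes (nodes.length + 1) [root_id] (pvChildren nodes root_id)

-- ===== PORT B =====
-- B's recursive 'dfs(node, depth)' mutating the depth table; the fuel argument is
-- a totality guard only (under Pre_ reachable paths have distinct nodes, so the
-- recursion depth never reaches nodes.length + 2).
def pvDfs (nodes : List (List Int)) : Nat → Int → Nat → List (List Int) → List (List Int)
  | 0, _, _, table => table
  | fuel+1, node, depth, table =>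
    let t1 := if depth = table.length then table ++ [[]] else table
    let t2 := t1.modify depth (fun lev => lev ++ [node])
    (pvChildren nodes node).foldl (fun t c => pvDfs nodes fuel c (depth+1) t) t2

def get_tree_border_alt (nodes : List (List Int)) (root_id : Int) : List Int :=
  let table := pvDfs nodes (nodes.length + 2) root_id 0 []
  (table.drop 1).foldl
    (fun border lev => border ++
      ((PySem.List.enumerate lev 0).filter
        (fun p => decide (p.1 = 0 ∨ p.1 = (lev.length : Int) - 1 ∨ pvRowSum nodes p.2 = -2))).map (·.2))
    [root_id]

-- ===== PRECONDITION & SPEC =====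
-- Reachability closure of the input's child graph (a property of the INPUT graph,
-- used only to state Pre_; neither port computes it). pvSuccs i = the valid child
-- indices of row i under Python's indexing (negative indices wrap).
def pvSuccs (nodes : List (List Int)) (i : Nat) : List Nat :=
  (nodes.getD i []).filterMap (fun c =>
    if c ≠ -1 ∧ -(nodes.length : Int) ≤ c ∧ c < (nodes.length : Int)
    then some (if c < 0 then (c + nodes.length).toNat else c.toNat) else none)

def pvCloseR (nodes : List (List Int)) (S : List Nat) : List Nat :=
  (fun T => (T ++ T.flatMap (pvSuccs nodes)).dedup)^[nodes.length] S

def pvRootIdx (nodes : List (List Int)) (root_id : Int) : Nat :=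
  (if root_id < 0 then root_id + nodes.length else root_id).toNat

-- Pre_ = exactly the inputs on which A returns: valid root index, every entry of a
-- REACHABLE row is -1 or a valid (possibly negative, wrapping) index, and no
-- reachable node lies on a cycle; outside this A raises IndexError or loops forever.
def Pre_get_tree_border (nodes : List (List Int)) (root_id : Int) : Prop :=
  PySem.Raise.InRange nodes.length root_id ∧
  ∀ i ∈ pvCloseR nodes [pvRootIdx nodes root_id],
    (∀ c ∈ nodes.getD i [], c = -1 ∨ (-(nodes.length : Int) ≤ c ∧ c < (nodes.length : Int))) ∧
    i ∉ pvCloseR nodes (pvSuccs nodes i)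
instance (nodes : List (List Int)) (root_id : Int) : Decidable (Pre_get_tree_border nodes root_id) := by
  unfold Pre_get_tree_border; infer_instance

def pvWitness_get_tree_border : List (List Int) × Int := ([[1, -1], [-1, -1]], 0)

def Spec_get_tree_border (nodes : List (List Int)) (root_id : Int) (out : List Int) : Prop := out = get_tree_border_alt nodes root_id
instance (nodes : List (List Int)) (root_id : Int) (out : List Int) : Decidable (Spec_get_tree_border nodes root_id out) := by unfold Spec_get_tree_border; infer_instance

-- ===== CLAIM (what is proved, stated in full; the proofs are below) =====
def Claim_equal_get_tree_border : Prop := ∀ (nodes : List (List Int)) (root_id : Int), Dom_get_tree_border nodes root_id → Pre_get_tree_border nodes root_id → Spec_get_tree_border nodes root_id (get_tree_border nodes root_id)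

-- ===== LEMMAS AND PROOFS =====

-- the BFS level table of a frontier, fuel-truncated (spec object for both ports)
def pvLevels (nodes : List (List Int)) : Nat → List Int → List (List Int)
  | 0, _ => []
  | f+1, ns => if ns = [] then [] else ns :: pvLevels nodes f (ns.flatMap (pvChildren nodes))

-- pointwise append of two level tables, keeping the longer tail
def pvIns : List (List Int) → List (List Int) → List (List Int)
  | t, [] => t
  | [], u => u
  | a::t, b::u => (a++b) :: pvIns t u

theorem pvIns_nil_right (t : List (List Int)) : pvIns t [] = t := by
  cases t <;> rfl

theorem pvIns_nil_left (u : List (List Int)) : pvIns [] u = u := by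
  cases u <;> rfl

theorem pvIns_length : ∀ (a b : List (List Int)), (pvIns a b).length = max a.length b.length
  | _, [] => by rw [pvIns_nil_right]; simp
  | [], _ => by rw [pvIns_nil_left]; simp
  | a::t, b::u => by simp [pvIns, pvIns_length t u]

theorem pvIns_assoc : ∀ (a b c : List (List Int)), pvIns (pvIns a b) c = pvIns a (pvIns b c)
  | _, _, [] => by rw [pvIns_nil_right, pvIns_nil_right]
  | a, [], c => by rw [pvIns_nil_right, pvIns_nil_left]
  | [], b, c => by rw [pvIns_nil_left, pvIns_nil_left]
  | a::t, b::u, c::v => by simp [pvIns, pvIns_assoc t u v]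

theorem pvLevels_nil (nodes : List (List Int)) (f : Nat) : pvLevels nodes f [] = [] := by
  cases f <;> simp [pvLevels]

theorem pvIns_levels (nodes : List (List Int)) :
    ∀ (f : Nat) (as bs : List Int),
    pvIns (pvLevels nodes f as) (pvLevels nodes f bs) = pvLevels nodes f (as ++ bs) := by
  intro f
  induction f with
  | zero => intro as bs; simp [pvLevels, pvIns]
  | succ f ih =>
    intro as bs
    rcases eq_or_ne as [] with rfl | ha
    · rw [pvLevels_nil, pvIns_nil_left, List.nil_append]
    rcases eq_or_ne bs [] with rfl | hb
    · rw [pvLevels_nil, pvIns_nil_right, List.append_nil]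
    have hab : as ++ bs ≠ [] := by simp [ha]
    rw [pvLevels, pvLevels, pvLevels, if_neg ha, if_neg hb, if_neg hab]
    simp only [pvIns, List.flatMap_append]
    rw [ih]

theorem pvTakeAt {α : Type} (l : List α) (x : α) (r : List α) :
    (l ++ x :: r).take (l.length + 1) = l ++ [x] := by
  induction l with
  | nil => simp
  | cons a l ih => simp [ih]

theorem pvDropAt {α : Type} (l : List α) (x : α) (r : List α) :
    (l ++ x :: r).drop (l.length + 1) = r := by
  induction l with
  | nil => simp
  | cons a l ih => simp [ih]

-- DFS from one node merges its depth-truncated level table into the table at depth d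
theorem pvDfs_eq (nodes : List (List Int)) :
    ∀ (f : Nat) (n : Int) (d : Nat) (t : List (List Int)), d ≤ t.length →
    pvDfs nodes f n d t = t.take d ++ pvIns (t.drop d) (pvLevels nodes f [n]) := by
  intro f
  induction f with
  | zero =>
    intro n d t hd
    simp [pvDfs, pvLevels, pvIns_nil_right]
  | succ f ih =>
    -- the child fold, at fuel f
    have Hfold : ∀ (cs : List Int) (d : Nat) (t : List (List Int)), d ≤ t.length →
        cs.foldl (fun t c => pvDfs nodes f c d t) t
          = t.take d ++ pvIns (t.drop d) (pvLevels nodes f cs) := by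
      intro cs
      induction cs with
      | nil =>
        intro d t hd
        simp [pvLevels_nil, pvIns_nil_right]
      | cons c cs ihc =>
        intro d t hd
        rw [List.foldl_cons, ih c d t hd]
        have hlen : d ≤ (t.take d ++ pvIns (t.drop d) (pvLevels nodes f [c])).length := by
          simp [List.length_take, Nat.min_eq_left hd]
        rw [ihc d _ hlen]
        have htake : (t.take d ++ pvIns (t.drop d) (pvLevels nodes f [c])).take d = t.take d := by
          rw [List.take_append_of_le_length (by simp [Nat.min_eq_left hd])]
          simp [List.take_take]
        have hdrop : (t.take d ++ pvIns (t.drop d) (pvLevels nodes f [c])).drop d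
            = pvIns (t.drop d) (pvLevels nodes f [c]) := by
          rw [List.drop_append_of_le_length (by simp [Nat.min_eq_left hd])]
          simp
        rw [htake, hdrop, pvIns_assoc, pvIns_levels]
        rfl
    intro n d t hd
    rw [pvDfs]
    rcases eq_or_ne d t.length with hdl | hdl
    · -- new maximal depth: a fresh slot is appended
      rw [if_pos hdl]
      have hmod : (t ++ [([] : List Int)]).modify d (fun lev => lev ++ [n]) = t ++ [[n]] := by
        rw [List.modify_eq_take_cons_drop (by simp [hdl])]
        subst hdl
        simp [pvDropAt, List.getElem_append_right]
      simp only [hmod]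
      rw [Hfold _ (d+1) _ (by simp [hdl])]
      have h1 : (t ++ [[n]]).take (d+1) = t ++ [[n]] := by
        subst hdl; exact pvTakeAt t [n] []
      have h2 : (t ++ [[n]]).drop (d+1) = [] := by
        subst hdl; exact pvDropAt t [n] []
      rw [h1, h2, pvIns_nil_left]
      subst hdl
      have hne : ([n] : List Int) ≠ [] := by simp
      rw [pvLevels, if_neg hne]
      simp [pvIns_nil_left]
    · -- existing slot
      have hlt : d < t.length := lt_of_le_of_ne hd hdl
      rw [if_neg hdl, List.modify_eq_take_cons_drop hlt]
      have hlen : d + 1 ≤ (t.take d ++ (t[d] ++ [n]) :: t.drop (d+1)).length := by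
        simp [List.length_take, Nat.min_eq_left (le_of_lt hlt)]
      rw [Hfold _ (d+1) _ hlen]
      have hlt' : (t.take d).length = d := by simp [Nat.min_eq_left (le_of_lt hlt)]
      have h1 := pvTakeAt (t.take d) (t[d] ++ [n]) (t.drop (d+1))
      have h2 := pvDropAt (t.take d) (t[d] ++ [n]) (t.drop (d+1))
      rw [hlt'] at h1 h2
      rw [h1, h2]
      have hne : ([n] : List Int) ≠ [] := by simp
      rw [pvLevels, if_neg hne]
      have hdropd : t.drop d = t[d] :: t.drop (d+1) := by
        rw [List.drop_eq_getElem_cons hlt]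
      rw [hdropd]
      simp [pvIns, List.flatMap_cons, List.flatMap_nil, List.append_nil, List.append_assoc]

-- A's fold over one level splits into the selected nodes and the flattened children.
theorem pvFoldPair (cond : Int × Int → Prop) [DecidablePred cond]
    (g : Int → List Int) (l : List (Int × Int)) (b c : List Int) :
    l.foldl (fun (s : List Int × List Int) p =>
        ((if cond p then s.1 ++ [p.2] else s.1), s.2 ++ g p.2)) (b, c)
      = (b ++ (l.filter (fun p => decide (cond p))).map (·.2), c ++ l.flatMap (fun p => g p.2)) := by
  induction l generalizing b c with
  | nil => simp
  | cons p l ih =>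
    simp only [List.foldl_cons, List.filter_cons, List.flatMap_cons]
    by_cases h : cond p <;> simp [h, ih]

-- the border selection B makes from one level (A's per-level selection has the same form)
def pvSel (nodes : List (List Int)) (lev : List Int) : List Int :=
  ((PySem.List.enumerate lev 0).filter
    (fun p => decide (p.1 = 0 ∨ p.1 = (lev.length : Int) - 1 ∨ pvRowSum nodes p.2 = -2))).map (·.2)

-- A's loop = fold of the per-level selections over the level table
theorem pvLoopEq (nodes : List (List Int)) :
    ∀ (fuel : Nat) (tv border : List Int),
    pvALoop nodes fuel border tv
      = (pvLevels nodes fuel tv).foldl (fun b lev => b ++ pvSel nodes lev) border := by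
  intro fuel
  induction fuel with
  | zero => intro tv border; simp [pvALoop, pvLevels]
  | succ f ih =>
    intro tv border
    by_cases h : tv.isEmpty
    · have : tv = [] := by simpa [List.isEmpty_iff] using h
      simp [pvALoop, pvLevels, this]
    · have hne : tv ≠ [] := by simpa [List.isEmpty_iff] using h
      rw [pvALoop, pvLevels, if_neg h, if_neg hne]
      have hsplit := pvFoldPair
        (fun p : Int × Int => p.1 = 0 ∨ p.1 = (tv.length : Int) - 1 ∨ pvRowSum nodes p.2 = -2)
        (pvChildren nodes) (PySem.List.enumerate tv 0) border []
      simp only [hsplit, List.nil_append]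
      have hflat : ∀ (l : List Int) (s : Int),
          (PySem.List.enumerate l s).flatMap (fun p => pvChildren nodes p.2)
            = l.flatMap (pvChildren nodes) := by
        intro l
        induction l with
        | nil => intro s; simp [PySem.List.enumerate_nil]
        | cons a l ihl => intro s; simp [PySem.List.enumerate_cons, ihl]
      rw [ih, hflat, List.foldl_cons]
      rfl

-- B's table = [root] followed by the BFS level table of root's children
theorem pvTableEq (nodes : List (List Int)) (root_id : Int) :
    pvDfs nodes (nodes.length + 2) root_id 0 []
      = [root_id] :: pvLevels nodes (nodes.length + 1) (pvChildren nodes root_id) := by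
  rw [pvDfs_eq nodes (nodes.length + 2) root_id 0 [] (by simp)]
  have hne : ([root_id] : List Int) ≠ [] := by simp
  rw [pvLevels, if_neg hne]
  simp [pvIns_nil_left, List.flatMap_cons, List.flatMap_nil]

-- ===== VERDICT (by name: the statement is the Claim_ definition above) =====
theorem get_tree_border_spec : Claim_equal_get_tree_border := by
  intro nodes root_id _ _
  unfold Spec_get_tree_border get_tree_border get_tree_border_alt
  rw [pvLoopEq nodes (nodes.length + 1) (pvChildren nodes root_id) [root_id], pvTableEq]
  rfl
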